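-- pv_equiv track=rewrite | github.com/Brian-Tae-Lee/02-251-Final-Project | Sars-Cov-2 Primer Creator.py | getTmScore
-- ===== SOURCE A (Python) =====
-- def getTmScore(seq):
--     score = 0
--     for chr in seq:
--         if chr == 'g' or chr == 'c':
--             score += 4
--         elif chr == 'a' or chr == 't':
--             score += 2
--         else:
--             raise Exception (chr + " not valid DNA strand")
--     return score
-- ===== SOURCE B (Python) =====
-- def getTmScore(seq):
--     counts = {}
--     for ch in seq:
--         counts[ch] = counts.get(ch, 0) + 1
--     for ch in counts:
--         if ch not in ('g', 'c', 'a', 't'):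
--             raise Exception(ch + " not valid DNA strand")
--     return 4 * (counts.get('g', 0) + counts.get('c', 0)) \
--          + 2 * (counts.get('a', 0) + counts.get('t', 0))
-- ===== Notes on version B (the rewrite author's own statement) =====
-- stated objective: alternative
-- what changed: Replaces the per-character running score accumulator with a frequency table built in one pass, validated by iterating its first-seen-ordered keys, and a closed-form score 4*(g+c)+2*(a+t).
import Mathlib
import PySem

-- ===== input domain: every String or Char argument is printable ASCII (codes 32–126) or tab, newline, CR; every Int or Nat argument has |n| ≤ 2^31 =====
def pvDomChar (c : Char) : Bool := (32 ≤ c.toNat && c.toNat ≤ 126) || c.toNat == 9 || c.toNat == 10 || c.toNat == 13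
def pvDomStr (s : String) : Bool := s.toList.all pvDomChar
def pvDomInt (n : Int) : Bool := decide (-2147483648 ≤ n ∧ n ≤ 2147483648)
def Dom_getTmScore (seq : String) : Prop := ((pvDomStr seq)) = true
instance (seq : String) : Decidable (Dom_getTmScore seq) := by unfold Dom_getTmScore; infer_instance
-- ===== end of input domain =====

-- B replaces A's running per-char score accumulator with a one-pass frequency table
-- and the closed-form score 4*(g+c)+2*(a+t) (alternative decomposition, same cost).


-- ===== PORT A =====
-- the loop body; none = the raised Exception (excluded by Pre_)
def getTmScoreStep (acc : Option Int) (c : Char) : Option Int :=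
  match acc with
  | none => none
  | some score =>
      if c = 'g' ∨ c = 'c' then some (score + 4)
      else if c = 'a' ∨ c = 't' then some (score + 2)
      else none

def getTmScore (seq : String) : Int :=
  (seq.toList.foldl getTmScoreStep (some 0)).getD 0

-- ===== PORT B =====
-- counts[ch] = counts.get(ch, 0) + 1 over the string; the validation loop only
-- raises (never changes the value) and Pre_ excludes exactly those inputs.
def getTmScore_alt (seq : String) : Int :=
  let counts : PySem.Dict Char Int :=
    seq.toList.foldl (fun d c => d.insert c (d.getD c 0 + 1)) PySem.Dict.empty
  4 * (counts.getD 'g' 0 + counts.getD 'c' 0)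
    + 2 * (counts.getD 'a' 0 + counts.getD 't' 0)

-- ===== PRECONDITION & SPEC =====
-- A (and B) raise Exception on any character outside 'g','c','a','t'; Pre_ excludes exactly those.
def Pre_getTmScore (seq : String) : Prop :=
  (seq.toList.all (fun c => c == 'g' || c == 'c' || c == 'a' || c == 't')) = true
instance (seq : String) : Decidable (Pre_getTmScore seq) := by unfold Pre_getTmScore; infer_instance

def pvWitness_getTmScore : String := "ga"

def Spec_getTmScore (seq : String) (out : Int) : Prop := out = getTmScore_alt seq
instance (seq : String) (out : Int) : Decidable (Spec_getTmScore seq out) := by unfold Spec_getTmScore; infer_instance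

-- ===== CLAIM (what is proved, stated in full; the proofs are below) =====
def Claim_equal_getTmScore : Prop := ∀ (seq : String), Dom_getTmScore seq → Pre_getTmScore seq → Spec_getTmScore seq (getTmScore seq)

-- ===== LEMMAS AND PROOFS =====

-- A's loop on an all-valid list computes the closed-form count score.
theorem getTmScore_foldl_eq (l : List Char) (s : Int)
    (h : ∀ c ∈ l, c = 'g' ∨ c = 'c' ∨ c = 'a' ∨ c = 't') :
    l.foldl getTmScoreStep (some s)
      = some (s + 4 * ((l.count 'g' : Int) + l.count 'c')
                + 2 * ((l.count 'a' : Int) + l.count 't')) := by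
  induction l generalizing s with
  | nil => simp
  | cons c l ih =>
    have hc := h c (by simp)
    have hl : ∀ x ∈ l, x = 'g' ∨ x = 'c' ∨ x = 'a' ∨ x = 't' :=
      fun x hx => h x (by simp [hx])
    rcases hc with h1 | h1 | h1 | h1 <;>
      subst h1 <;>
      simp only [List.foldl_cons, getTmScoreStep, List.count_cons] <;>
      simp only [if_pos, or_self, or_false, Char.reduceEq, ite_false, or_true] <;>
      rw [ih _ hl] <;> simp <;> ring

theorem getTmScore_spec : Claim_equal_getTmScore := by
  intro seq _ hpre
  unfold Pre_getTmScore at hpre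
  simp only [List.all_eq_true, Bool.or_eq_true, beq_iff_eq] at hpre
  unfold Spec_getTmScore getTmScore getTmScore_alt
  rw [getTmScore_foldl_eq _ 0 (fun c hc => by rcases hpre c hc with ((h|h)|h)|h <;> simp [h])]
  simp only [PySem.Dict.getD_foldl_insert_add_one, PySem.Dict.getD_empty, Option.getD_some]
  ring
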